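-- pv_equiv track=rewrite | github.com/kjnh10/pcw | work/atcoder/arc/arc084/D/answers/745010_katakos.py | solve
-- ===== SOURCE A (Python) =====
-- from collections import deque
--
-- def solve(k):
--     que = deque([(1, 1)])
--     checked = set()
--     while True:
--         cost, num = que.popleft()
--         if num == 0 or num == k:
--             return cost
--         if num in checked:
--             continue
--         checked.add(num)
--         que.appendleft((cost, num * 10 % k))
--         que.append((cost + 1, num + 1))
-- ===== SOURCE B (Python) =====
-- def solve(k):
--     # Level-synchronized 0-1 BFS: follow the free *10%k chain inline at each
--     # cost level instead of managing a cost-tagged deque.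
--     checked = set()
--     cost, level = 1, [1]
--     while level:
--         nxt = []
--         for start in level:
--             num = start
--             while True:
--                 if num == 0 or num == k:
--                     return cost
--                 if num in checked:
--                     break
--                 checked.add(num)
--                 nxt.append(num + 1)
--                 num = num * 10 % k
--         cost += 1
--         level = nxt
-- ===== Notes on version B (the rewrite author's own statement) =====
-- stated objective: alternative
-- what changed: Replaces the cost-tagged deque (0-1 BFS with appendleft/append and tuple entries) by level-synchronized BFS: plain int lists per cost level with the free *10%k chain followed by an inline inner loop, so no deque and no (cost,num) tuples are allocated.
import Mathlib
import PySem

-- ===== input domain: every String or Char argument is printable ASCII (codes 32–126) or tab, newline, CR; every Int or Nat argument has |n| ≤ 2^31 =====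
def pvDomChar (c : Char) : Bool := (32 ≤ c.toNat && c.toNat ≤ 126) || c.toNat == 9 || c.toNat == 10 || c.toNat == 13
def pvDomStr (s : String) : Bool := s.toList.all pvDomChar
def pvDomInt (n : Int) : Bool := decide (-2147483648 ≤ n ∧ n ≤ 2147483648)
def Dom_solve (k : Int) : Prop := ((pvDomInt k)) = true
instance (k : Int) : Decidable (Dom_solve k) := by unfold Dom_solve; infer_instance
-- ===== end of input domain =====

-- B replaces A's cost-tagged deque (0-1 BFS with appendleft/append) by level-synchronized
-- BFS lists with an inline *10%k chain walk; same asymptotic cost, different bookkeeping.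

-- ===== PORT A =====
-- A's 'while True' loop over the deque, one fuel unit per popleft; fuel exhaustion and
-- popleft from an empty deque (IndexError, excluded by Pre_) both yield the default 0.
def solveLoopA (k : Int) : Nat → PySem.Set Int → List (Int × Int) → Int
  | 0, _, _ => 0
  | _ + 1, _, [] => 0
  | fuel + 1, checked, (cost, num) :: que =>
    if num == 0 || num == k then cost
    else if PySem.Set.contains checked num then solveLoopA k fuel checked que
    else solveLoopA k fuel (PySem.Set.add checked num)
      ((cost, PySem.Int.mod (num * 10) k) :: que ++ [(cost + 1, num + 1)])

def solve (k : Int) : Int := solveLoopA k (2 * k.natAbs + 8) PySem.Set.empty [(1, 1)]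

-- ===== PORT B =====
-- State of Source B's nested loops: current cost, current chain value num, the rest of the
-- current level, and the next level; one fuel unit per inner-loop iteration.
def solveLoopB (k : Int) : Nat → PySem.Set Int → Int → Int → List Int → List Int → Int
  | 0, _, _, _, _, _ => 0
  | fuel + 1, checked, cost, num, rest, nxt =>
    if num == 0 || num == k then cost
    else if PySem.Set.contains checked num then
      match rest, nxt with
      | r :: rs, _ => solveLoopB k fuel checked cost r rs nxt
      | [], n :: ns => solveLoopB k fuel checked (cost + 1) n ns []
      | [], [] => 0
    else solveLoopB k fuel (PySem.Set.add checked num) cost (PySem.Int.mod (num * 10) k)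
      rest (nxt ++ [num + 1])

def solve_alt (k : Int) : Int := solveLoopB k (2 * k.natAbs + 8) PySem.Set.empty 1 1 [] []

-- ===== PRECONDITION & SPEC =====
-- Pre_ excludes only k = 0, where Python A raises ZeroDivisionError at 'num * 10 % k'.
def Pre_solve (k : Int) : Prop := k ≠ 0
instance (k : Int) : Decidable (Pre_solve k) := by unfold Pre_solve; infer_instance
def pvWitness_solve : Int := 6

def Spec_solve (k : Int) (out : Int) : Prop := out = solve_alt k
instance (k : Int) (out : Int) : Decidable (Spec_solve k out) := by unfold Spec_solve; infer_instance

-- ===== CLAIM (what is proved, stated in full; the proofs are below) =====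
def Claim_equal_solve : Prop := ∀ (k : Int), Dom_solve k → Pre_solve k → Spec_solve k (solve k)

-- ===== LEMMAS AND PROOFS =====

lemma loopA_nil (k : Int) (fuel : Nat) (checked : PySem.Set Int) :
    solveLoopA k fuel checked [] = 0 := by
  cases fuel <;> rfl

-- The representation of B's loop state as A's deque: the current chain value at the
-- current cost in front, the rest of the level at this cost, then the next level at cost+1.
lemma bisim (k : Int) : ∀ (fuel : Nat) (checked : PySem.Set Int) (cost num : Int)
    (rest nxt : List Int),
    solveLoopA k fuel checked
      ((cost, num) :: (rest.map (fun r => (cost, r)) ++ nxt.map (fun n => (cost + 1, n))))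
    = solveLoopB k fuel checked cost num rest nxt := by
  intro fuel
  induction fuel with
  | zero => intro checked cost num rest nxt; rfl
  | succ fuel ih =>
    intro checked cost num rest nxt
    show (if num == 0 || num == k then cost
          else if PySem.Set.contains checked num then
            solveLoopA k fuel checked
              (rest.map (fun r => (cost, r)) ++ nxt.map (fun n => (cost + 1, n)))
          else solveLoopA k fuel (PySem.Set.add checked num)
            ((cost, PySem.Int.mod (num * 10) k) ::
              (rest.map (fun r => (cost, r)) ++ nxt.map (fun n => (cost + 1, n)))
              ++ [(cost + 1, num + 1)])) = _
    by_cases hterm : (num == 0 || num == k) = true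
    · simp only [hterm, solveLoopB]
      simp
    · by_cases hmem : PySem.Set.contains checked num = true
      · simp only [solveLoopB]
        rw [if_neg (by simp_all), if_pos hmem, if_neg (by simp_all), if_pos hmem]
        cases rest with
        | cons r rs =>
          have := ih checked cost r rs nxt
          simpa using this
        | nil =>
          cases nxt with
          | nil => simpa using loopA_nil k fuel checked
          | cons n ns =>
            have := ih checked (cost + 1) n ns []
            simpa using this
      · simp only [solveLoopB]
        rw [if_neg (by simp_all), if_neg hmem, if_neg (by simp_all), if_neg hmem]
        have := ih (PySem.Set.add checked num) cost (PySem.Int.mod (num * 10) k)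
          rest (nxt ++ [num + 1])
        rw [← this]
        simp [List.append_assoc]

-- ===== VERDICT (by name: the statement is the Claim_ definition above) =====
theorem solve_spec : Claim_equal_solve := by
  intro k _ _
  unfold Spec_solve solve solve_alt
  simpa using bisim k (2 * k.natAbs + 8) PySem.Set.empty 1 1 [] []
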